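-- pv_equiv track=rewrite | github.com/ksparavec/traceroute_simulator | src/simulators/batch_command_generator.py | _create_route_key
-- ===== SOURCE A (Python) =====
-- def _create_route_key(route, table):
--     """Create a normalized key for route duplicate detection."""
--     # Parse route to extract key components
--     parts = route.split()
--     destination = parts[0] if parts else ""
--
--     # Extract key attributes
--     dev = None
--     via = None
--     metric = None
--     proto = None
--
--     for i, part in enumerate(parts):
--         if part == "dev" and i + 1 < len(parts):
--             dev = parts[i + 1]
--         elif part == "via" and i + 1 < len(parts):
--             via = parts[i + 1]
--         elif part == "metric" and i + 1 < len(parts):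
--             metric = parts[i + 1]
--         elif part == "proto" and i + 1 < len(parts):
--             proto = parts[i + 1]
--
--     # Create key from essential components
--     # Routes are duplicates if they have same destination, device, gateway, and table
--     return (table, destination, dev, via)
-- ===== SOURCE B (Python) =====
-- def _create_route_key(route, table):
--     """Create a normalized key for route duplicate detection."""
--     parts = route.split()
--     pairs = list(zip(parts, parts[1:]))
--
--     def last_value(kw):
--         # search backwards: first match from the right = last occurrence
--         for a, b in reversed(pairs):
--             if a == kw:
--                 return b
--         return None
--
--     return (table, parts[0] if parts else "", last_value("dev"), last_value("via"))
-- ===== Notes on version B (the rewrite author's own statement) =====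
-- stated objective: alternative
-- what changed: Replaces A's single forward stateful pass (enumerate with a four-way keyword branch cascade updating accumulators, last write wins) by building the adjacent-pair list once and answering each keyword with an early-exit backward search (first match from the right), dropping the unused metric/proto tracking.
import Mathlib
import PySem

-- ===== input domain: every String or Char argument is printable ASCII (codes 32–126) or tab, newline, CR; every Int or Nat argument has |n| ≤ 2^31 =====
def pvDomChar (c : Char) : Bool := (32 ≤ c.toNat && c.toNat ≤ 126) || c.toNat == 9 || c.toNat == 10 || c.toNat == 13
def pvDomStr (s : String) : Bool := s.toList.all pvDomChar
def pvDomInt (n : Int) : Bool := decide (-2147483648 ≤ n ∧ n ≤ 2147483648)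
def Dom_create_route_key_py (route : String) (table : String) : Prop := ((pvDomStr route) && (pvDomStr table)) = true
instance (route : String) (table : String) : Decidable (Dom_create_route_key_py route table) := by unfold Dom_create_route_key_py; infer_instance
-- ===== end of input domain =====

-- B builds the adjacent-pair list once and searches it BACKWARDS with early exit per keyword, instead of A's forward stateful keyword-branch pass; same cost, plainer per-keyword logic.
-- ===== PORT A =====
-- A-side helper: the body of A's for-loop (the if/elif cascade), literally.
def pvBodyA (parts : List String)
    (s : Option String × Option String × Option String × Option String)
    (ip : Int × String) :
    Option String × Option String × Option String × Option String :=
  if ip.2 = "dev" ∧ ip.1 + 1 < (parts.length : Int) then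
    (some (PySem.List.pyGetD parts (ip.1 + 1) ""), s.2.1, s.2.2.1, s.2.2.2)
  else if ip.2 = "via" ∧ ip.1 + 1 < (parts.length : Int) then
    (s.1, some (PySem.List.pyGetD parts (ip.1 + 1) ""), s.2.2.1, s.2.2.2)
  else if ip.2 = "metric" ∧ ip.1 + 1 < (parts.length : Int) then
    (s.1, s.2.1, some (PySem.List.pyGetD parts (ip.1 + 1) ""), s.2.2.2)
  else if ip.2 = "proto" ∧ ip.1 + 1 < (parts.length : Int) then
    (s.1, s.2.1, s.2.2.1, some (PySem.List.pyGetD parts (ip.1 + 1) ""))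
  else s

def create_route_key_py (route : String) (table : String) :
    Option String × Option String × Option String × Option String :=
  let parts := PySem.Str.split₀ route
  let destination := match parts with | [] => "" | p :: _ => p
  let st := (PySem.List.enumerate parts).foldl (pvBodyA parts) (none, none, none, none)
  (some table, some destination, st.1, st.2.1)

-- ===== PORT B =====
-- Source B's last_value: early-exit loop over the reversed pair list (first match from the right).
def pvLastValue : List (String × String) → String → Option String
  | [], _ => none
  | (a, b) :: rest, kw => if a = kw then some b else pvLastValue rest kw

def create_route_key_py_alt (route : String) (table : String) :
    Option String × Option String × Option String × Option String :=
  let parts := PySem.Str.split₀ route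
  let pairs := parts.zip (PySem.List.slice parts (some 1) none)
  (some table, some (match parts with | [] => "" | p :: _ => p),
   pvLastValue pairs.reverse "dev", pvLastValue pairs.reverse "via")

-- ===== PRECONDITION & SPEC =====
def Spec_create_route_key_py (route : String) (table : String) (out : Option String × Option String × Option String × Option String) : Prop := out = create_route_key_py_alt route table
instance (route : String) (table : String) (out : Option String × Option String × Option String × Option String) : Decidable (Spec_create_route_key_py route table out) := by unfold Spec_create_route_key_py; infer_instance

-- ===== CLAIM (what is proved, stated in full; the proofs are below) =====
def Claim_equal_create_route_key_py : Prop := ∀ (route : String) (table : String), Dom_create_route_key_py route table → Spec_create_route_key_py route table (create_route_key_py route table)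

-- ===== LEMMAS AND PROOFS =====

-- the keyword dispatch applied to one adjacent pair (x, y)
def pvUpd (s : Option String × Option String × Option String × Option String)
    (x y : String) :
    Option String × Option String × Option String × Option String :=
  (if x = "dev" then some y else s.1,
   if x = "via" then some y else s.2.1,
   if x = "metric" then some y else s.2.2.1,
   if x = "proto" then some y else s.2.2.2)

-- A's enumerate-indexed loop is a fold of pvUpd over the adjacent pairs
theorem pv_enumFold (pre xs : List String)
    (s : Option String × Option String × Option String × Option String) :
    (PySem.List.enumerate xs (pre.length : Int)).foldl (pvBodyA (pre ++ xs)) s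
      = (xs.zip xs.tail).foldl (fun s p => pvUpd s p.1 p.2) s := by
  induction xs generalizing pre s with
  | nil => simp [PySem.List.enumerate]
  | cons x xs ih =>
    rw [PySem.List.enumerate_cons]
    cases xs with
    | nil =>
      have hb : pvBodyA (pre ++ [x]) s ((pre.length : Int), x) = s := by
        unfold pvBodyA
        simp only []
        have hlen : ¬ ((pre.length : Int) + 1 < ((pre ++ [x]).length : Int)) := by
          simp
        split_ifs with h1 h2 h3 h4 <;>
          first
          | rfl
          | (exact absurd (by exact h1.2) hlen)
          | (exact absurd (by exact h2.2) hlen)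
          | (exact absurd (by exact h3.2) hlen)
          | (exact absurd (by exact h4.2) hlen)
      simp [PySem.List.enumerate, hb]
    | cons y ys =>
      have hget : PySem.List.pyGetD (pre ++ x :: y :: ys) ((pre.length : Int) + 1) "" = y := by
        have : ((pre.length : Int) + 1) = ((pre.length + 1 : Nat) : Int) := by push_cast; ring
        rw [this, PySem.List.pyGetD_natCast]
        simp [List.getD]
      have hlen : (pre.length : Int) + 1 < ((pre ++ x :: y :: ys).length : Int) := by
        simp
      have hb : pvBodyA (pre ++ x :: y :: ys) s ((pre.length : Int), x) = pvUpd s x y := by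
        unfold pvBodyA pvUpd
        simp only [hget]
        by_cases h1 : x = "dev" <;> by_cases h2 : x = "via" <;>
          by_cases h3 : x = "metric" <;> by_cases h4 : x = "proto" <;>
          simp_all
      have hcast : (pre.length : Int) + 1 = ((pre ++ [x]).length : Int) := by simp
      have happ : pre ++ x :: y :: ys = (pre ++ [x]) ++ y :: ys := by simp
      rw [List.foldl_cons, hb, hcast, happ, ih (pre ++ [x])]
      simp [List.zip]

-- the pvUpd fold computed componentwise
theorem pv_zipFold (ps : List (String × String))
    (s : Option String × Option String × Option String × Option String) :
    ps.foldl (fun s p => pvUpd s p.1 p.2) s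
      = (ps.foldl (fun a p => if p.1 = "dev" then some p.2 else a) s.1,
         ps.foldl (fun a p => if p.1 = "via" then some p.2 else a) s.2.1,
         ps.foldl (fun a p => if p.1 = "metric" then some p.2 else a) s.2.2.1,
         ps.foldl (fun a p => if p.1 = "proto" then some p.2 else a) s.2.2.2) := by
  induction ps generalizing s with
  | nil => rfl
  | cons p ps ih => rw [List.foldl_cons, ih]; rfl

-- backward first match = forward last-write-wins fold
theorem pv_last (ps : List (String × String)) (k : String) :
    pvLastValue ps k
      = ps.reverse.foldl (fun a p => if p.1 = k then some p.2 else a) none := by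
  induction ps with
  | nil => rfl
  | cons p ps ih =>
    obtain ⟨a, b⟩ := p
    rw [List.reverse_cons, List.foldl_append, List.foldl_cons, List.foldl_nil, ← ih]
    by_cases h : a = k <;> simp [pvLastValue, h]

-- ===== VERDICT (by name: the statement is the Claim_ definition above) =====
theorem create_route_key_py_spec : Claim_equal_create_route_key_py := by
  intro route table _
  unfold Spec_create_route_key_py create_route_key_py create_route_key_py_alt
  simp only [PySem.List.slice_from_one]
  have := pv_enumFold [] (PySem.Str.split₀ route) (none, none, none, none)
  simp only [List.nil_append, List.length_nil, Nat.cast_zero] at this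
  rw [this, pv_zipFold, pv_last, pv_last, List.reverse_reverse]
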